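-- pv_equiv track=rewrite | github.com/duckycodess/cs12labexercises | hope3/hope3d1.py | repdigits_at_most
-- ===== SOURCE A (Python) =====
-- def repdigits_at_most(n: int) -> list[int]:
--     rep: list[int] = []
--     for i in range(1, 10):
--         if i > n:
--             break
--         rep.append(i)
--
--         mult = 11
--         while True:
--             repdigit = i * mult
--             if repdigit > n:
--                 break
--             rep.append(repdigit)
--             mult = mult * 10 + 1
--
--     return sorted(rep)
-- ===== SOURCE B (Python) =====
-- def repdigits_at_most(n: int) -> list[int]:
--     if n < 1:
--         return []
--     # L = number of decimal digits of n, p = 10**L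
--     L, p = 1, 10
--     while p <= n:
--         p *= 10
--         L += 1
--     R = (p - 1) // 9                     # L-digit repunit 11...1
--     k = 9 * (L - 1) + min(9, n // R)     # closed-form count of repdigits <= n
--     return [(i % 9 + 1) * (10 ** (i // 9 + 1) - 1) // 9 for i in range(k)]
-- ===== Notes on version B (the rewrite author's own statement) =====
-- stated objective: alternative
-- what changed: B replaces A's generate-and-test nested loops plus final sort by arithmetic: it counts the decimal digits of n, computes the total number k of repdigits not exceeding n in closed form, and emits the i-th repdigit directly by an index formula over range(k).
import Mathlib
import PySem

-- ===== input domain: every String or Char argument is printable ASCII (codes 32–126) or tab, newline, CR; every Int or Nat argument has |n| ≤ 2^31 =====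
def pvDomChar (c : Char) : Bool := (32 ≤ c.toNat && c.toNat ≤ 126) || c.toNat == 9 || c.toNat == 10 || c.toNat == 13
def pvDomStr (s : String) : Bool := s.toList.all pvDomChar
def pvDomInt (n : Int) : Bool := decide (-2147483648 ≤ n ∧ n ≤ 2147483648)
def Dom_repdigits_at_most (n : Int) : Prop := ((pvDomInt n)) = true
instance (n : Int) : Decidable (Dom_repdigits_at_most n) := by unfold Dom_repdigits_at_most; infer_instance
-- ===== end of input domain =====

-- B replaces A's generate-and-test nested loops plus final sort by arithmetic: it counts the
-- digits of n, computes the number k of repdigits ≤ n in closed form, and emits the i-th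
-- repdigit directly by an index formula (objective: alternative).

-- ===== PORT A =====
-- A's inner `while True` loop: keeps appending i*mult while i*mult ≤ n.
-- The Nat argument is fuel making the recursion structural; on the domain |n| ≤ 2^31 the loop
-- stops within 10 iterations (i*mult ≥ 11111111111 > 2^31 after 9 steps), so the constant fuel 12
-- used below is never exhausted there and the port computes exactly what the Python loop computes.
def repA_inner : Nat → Int → Int → Int → List Int → List Int
  | 0, _, _, _, acc => acc
  | fuel+1, n, i, mult, acc =>
    if i * mult > n then acc
    else repA_inner fuel n i (mult * 10 + 1) (acc ++ [i * mult])

-- A's `for i in range(1, 10)` loop with its `break`.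
def repA_loop (n : Int) : List Int → List Int → List Int
  | [], acc => acc
  | d :: rest, acc =>
    if d > n then acc
    else repA_loop n rest (repA_inner 12 n d 11 (acc ++ [d]))

def repdigits_at_most (n : Int) : List Int :=
  PySem.List.sorted (repA_loop n (PySem.List.pyRange 1 10 1) []) (fun x => x) false

-- ===== PORT B =====
-- B's `while p <= n` digit-count loop over the state (L, p); p starts at 10 and is multiplied
-- by 10 each turn, so on the domain |n| ≤ 2^31 < 10^10 it stops within 10 tests and the
-- constant fuel 12 below is never exhausted there.
def digLenB : Nat → Int → Int × Int → Int × Int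
  | 0, _, s => s
  | fuel+1, n, (L, p) => if p ≤ n then digLenB fuel n (L + 1, p * 10) else (L, p)

def repdigits_at_most_alt (n : Int) : List Int :=
  if n < 1 then []
  else
    let s := digLenB 12 n (1, 10)
    let R := PySem.Int.floordiv (s.2 - 1) 9
    let k := 9 * (s.1 - 1) + min 9 (PySem.Int.floordiv n R)
    -- Python's `10 ** (i // 9 + 1)`: the exponent i//9+1 is ≥ 1 for every i of range(k)
    -- (i ≥ 0), so the `.toNat` below is exact there.
    (PySem.List.pyRange 0 k 1).map (fun i =>
      PySem.Int.floordiv ((PySem.Int.mod i 9 + 1) * (10 ^ (PySem.Int.floordiv i 9 + 1).toNat - 1)) 9)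

-- ===== PRECONDITION & SPEC =====
def Spec_repdigits_at_most (n : Int) (out : List Int) : Prop := out = repdigits_at_most_alt n
instance (n : Int) (out : List Int) : Decidable (Spec_repdigits_at_most n out) := by unfold Spec_repdigits_at_most; infer_instance

-- ===== CLAIM (what is proved, stated in full; the proofs are below) =====
def Claim_equal_repdigits_at_most : Prop := ∀ (n : Int), Dom_repdigits_at_most n → Spec_repdigits_at_most n (repdigits_at_most n)

-- ===== LEMMAS AND PROOFS =====

-- the repunit sequence starting at m, k terms: m, m*10+1, …
def ruFrom : Nat → Int → List Int
  | 0, _ => []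
  | k+1, m => m :: ruFrom k (m * 10 + 1)

-- the k-th iterate of m ↦ m*10+1
def iterM : Nat → Int → Int
  | 0, m => m
  | k+1, m => iterM k (m * 10 + 1)

-- the m-digit repunit 11…1
def repunit : Nat → Int
  | 0 => 0
  | m+1 => repunit m * 10 + 1

-- the canonical ascending list of repdigits ≤ n, grouped by repunit (10 lengths cover the domain)
def rdCanon (n : Int) : List Int :=
  (ruFrom 10 1).flatMap (fun m => ((PySem.List.pyRange 1 10 1).filter (fun x => decide (x * m ≤ n))).map (fun x => x * m))

theorem nine_mul_repunit : ∀ m : Nat, 9 * repunit m = 10 ^ m - 1 := by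
  intro m
  induction m with
  | zero => simp [repunit]
  | succ m ih => rw [repunit, pow_succ]; ring_nf; ring_nf at ih; omega

theorem mem_ruFrom_ge : ∀ (k : Nat) (m x : Int), 1 ≤ m → x ∈ ruFrom k m → m ≤ x := by
  intro k
  induction k with
  | zero => intro m x _ hx; simp [ruFrom] at hx
  | succ k ih =>
    intro m x hm hx
    simp only [ruFrom, List.mem_cons] at hx
    rcases hx with rfl | hx
    · exact le_refl x
    · have := ih _ _ (by omega) hx; omega

theorem repA_inner_eq (n : Int) : ∀ (k fuel : Nat) (i m : Int) (acc : List Int),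
    k ≤ fuel → 1 ≤ i → 1 ≤ m → n < i * iterM k m →
    repA_inner fuel n i m acc
      = acc ++ ((ruFrom k m).filter (fun x => decide (i * x ≤ n))).map (fun x => i * x) := by
  intro k
  induction k with
  | zero =>
    intro fuel i m acc _ hi hm hstop
    simp only [iterM] at hstop
    cases fuel with
    | zero => simp [repA_inner, ruFrom]
    | succ fuel => simp [repA_inner, ruFrom, show i * m > n by omega]
  | succ k ih =>
    intro fuel i m acc hfuel hi hm hstop
    obtain ⟨f, rfl⟩ : ∃ f, fuel = f + 1 := ⟨fuel - 1, by omega⟩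
    rw [repA_inner]
    by_cases h : i * m > n
    · simp only [h, if_true]
      have hfil : (ruFrom (k+1) m).filter (fun x => decide (i * x ≤ n)) = [] := by
        rw [List.filter_eq_nil_iff]
        intro x hx
        have hmx : m ≤ x := mem_ruFrom_ge _ _ _ hm hx
        have : i * m ≤ i * x := by nlinarith
        simp; omega
      simp [hfil]
    · simp only [h, if_false]
      have hle : i * m ≤ n := by omega
      have hstop' : n < i * iterM k (m * 10 + 1) := by simpa [iterM] using hstop
      rw [ih f i (m * 10 + 1) _ (by omega) hi (by omega) hstop']
      simp [ruFrom, hle, List.append_assoc]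

theorem repA_loop_eq (n : Int) (hn : n ≤ 2147483648) :
    ∀ (ds : List Int), (∀ d ∈ ds, 1 ≤ d) → ds.Pairwise (· ≤ ·) →
    ∀ (acc : List Int),
    repA_loop n ds acc
      = acc ++ ds.flatMap (fun d => ((ruFrom 10 1).filter (fun x => decide (d * x ≤ n))).map (fun x => d * x)) := by
  intro ds
  induction ds with
  | nil => intro _ _ acc; simp [repA_loop]
  | cons d rest ih =>
    intro h hpw acc
    have hd1 : 1 ≤ d := h d List.mem_cons_self
    rw [repA_loop]
    by_cases hdn : d > n
    · simp only [hdn, if_true]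
      have hfil : ∀ d' ∈ rest, ((ruFrom 10 1).filter (fun x => decide (d' * x ≤ n))).map (fun x => d' * x) = ([] : List Int) := by
        intro d' hd'
        have hdd' : d ≤ d' := (List.pairwise_cons.mp hpw).1 d' hd'
        have hd'1 : 1 ≤ d' := h d' (List.mem_cons_of_mem _ hd')
        have : (ruFrom 10 1).filter (fun x => decide (d' * x ≤ n)) = [] := by
          rw [List.filter_eq_nil_iff]
          intro x hx
          have hx1 : (1 : Int) ≤ x := mem_ruFrom_ge _ _ _ (by omega) hx
          have : d' * 1 ≤ d' * x := by nlinarith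
          simp; omega
        simp [this]
      have hflat : rest.flatMap (fun d => ((ruFrom 10 1).filter (fun x => decide (d * x ≤ n))).map (fun x => d * x)) = [] := by
        rw [List.flatMap_eq_nil_iff]; intro l hl; exact hfil l hl
      have hhead : (ruFrom 10 1).filter (fun x => decide (d * x ≤ n)) = [] := by
        rw [List.filter_eq_nil_iff]
        intro x hx
        have hx1 : (1 : Int) ≤ x := mem_ruFrom_ge _ _ _ (by omega) hx
        have : d * 1 ≤ d * x := by nlinarith
        simp; omega
      simp [hhead, hflat]
    · simp only [hdn, if_false]
      have hdn' : d ≤ n := by omega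
      have hstop : n < d * iterM 9 11 := by
        have : iterM 9 11 = 11111111111 := by decide
        rw [this]
        nlinarith
      rw [ih (fun x hx => h x (List.mem_cons_of_mem _ hx)) (List.pairwise_cons.mp hpw).2]
      rw [repA_inner_eq n 9 12 d 11 _ (by omega) hd1 (by omega) hstop]
      have hru : ruFrom 10 1 = 1 :: ruFrom 9 11 := by decide
      rw [hru]
      simp [List.filter_cons, hdn', List.append_assoc]

-- (filter, then map) written as a flatMap into singleton/empty lists
theorem filter_map_eq_flatMap (l : List Int) (p : Int → Prop) [DecidablePred p] (g : Int → Int) :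
    (l.filter (fun x => decide (p x))).map g
      = l.flatMap (fun x => if p x then [g x] else []) := by
  induction l with
  | nil => simp
  | cons a l ih =>
    by_cases h : p a <;> simp [h, ih]

theorem perm_middle_swap {γ : Type} (w x y z : List γ) [DecidableEq γ] :
    ((w ++ x) ++ (y ++ z)).Perm ((w ++ y) ++ (x ++ z)) := by
  rw [List.perm_iff_count]
  intro a
  simp only [List.count_append]
  ring

theorem flatMap_append_perm {γ β : Type} [DecidableEq γ] (l : List β) (g h : β → List γ) :
    (l.flatMap fun b => g b ++ h b).Perm (l.flatMap g ++ l.flatMap h) := by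
  induction l with
  | nil => simp
  | cons b l ih =>
    simp only [List.flatMap_cons]
    exact (ih.append_left _).trans (perm_middle_swap (g b) (h b) (l.flatMap g) (l.flatMap h))

theorem flatMap_swap_perm {α β γ : Type} [DecidableEq γ] (l₁ : List α) (l₂ : List β) (f : α → β → List γ) :
    (l₁.flatMap fun a => l₂.flatMap fun b => f a b).Perm
      (l₂.flatMap fun b => l₁.flatMap fun a => f a b) := by
  induction l₁ with
  | nil => simp
  | cons a l₁ ih =>
    simp only [List.flatMap_cons]
    exact (ih.append_left _).trans (flatMap_append_perm l₂ _ _).symm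

-- filter commutes out of a flatMap
theorem flatMap_filter_comm (l : List Int) (F : Int → List Int) (p : Int → Bool) :
    l.flatMap (fun m => (F m).filter p) = (l.flatMap F).filter p := by
  induction l with
  | nil => simp
  | cons a l ih => simp [List.flatMap_cons, List.filter_append, ih]

set_option maxRecDepth 8000 in
theorem rdCanon_pairwise (n : Int) : (rdCanon n).Pairwise (· < ·) := by
  have hcomm : ∀ m : Int, ((PySem.List.pyRange 1 10 1).filter (fun d => decide (d * m ≤ n))).map (fun d => d * m)
      = ((PySem.List.pyRange 1 10 1).map (fun d => d * m)).filter (fun v => decide (v ≤ n)) := by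
    intro m
    rw [List.filter_map]
    rfl
  unfold rdCanon
  simp only [hcomm]
  rw [flatMap_filter_comm]
  apply List.Pairwise.filter
  exact List.isChain_iff_pairwise.mp (by decide)

-- A's raw list is a permutation of the canonical list (swap the digit/length flatMaps)
theorem A_eq_canon (n : Int) (hn : n ≤ 2147483648) : repdigits_at_most n = rdCanon n := by
  have hA : repA_loop n (PySem.List.pyRange 1 10 1) []
      = (PySem.List.pyRange 1 10 1).flatMap (fun d => ((ruFrom 10 1).filter (fun x => decide (d * x ≤ n))).map (fun x => d * x)) :=
    (repA_loop_eq n hn _ (by decide) (by decide) []).trans (List.nil_append _)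
  have hperm : (rdCanon n).Perm
      ((PySem.List.pyRange 1 10 1).flatMap (fun d => ((ruFrom 10 1).filter (fun x => decide (d * x ≤ n))).map (fun x => d * x))) := by
    have h1 : ∀ d : Int, ((ruFrom 10 1).filter (fun x => decide (d * x ≤ n))).map (fun x => d * x)
        = (ruFrom 10 1).flatMap (fun x => if d * x ≤ n then [d * x] else []) := by
      intro d; exact filter_map_eq_flatMap _ (fun x => d * x ≤ n) (fun x => d * x)
    have h2 : ∀ m : Int, ((PySem.List.pyRange 1 10 1).filter (fun d => decide (d * m ≤ n))).map (fun d => d * m)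
        = (PySem.List.pyRange 1 10 1).flatMap (fun d => if d * m ≤ n then [d * m] else []) := by
      intro m; exact filter_map_eq_flatMap _ (fun d => d * m ≤ n) (fun d => d * m)
    unfold rdCanon
    simp only [h1, h2]
    exact flatMap_swap_perm _ _ _
  unfold repdigits_at_most
  exact (congrArg (fun l => PySem.List.sorted l (fun x => x) false) hA).trans
    (PySem.List.sorted_eq_of_perm_of_pairwise_lt _ _ _ hperm (rdCanon_pairwise n))

-- ===== B side =====

-- the digit-count loop: starting from L digits (p = 10^L), it stops at the digit count j of n
theorem digLenB_eval (n : Int) : ∀ (fuel L j : Nat), 1 ≤ L → L ≤ j → j < L + fuel →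
    (10:Int)^(j-1) ≤ n → n < (10:Int)^j →
    digLenB fuel n ((L : Int), (10:Int)^L) = ((j : Int), (10:Int)^j) := by
  intro fuel
  induction fuel with
  | zero => intro L j _ h1 h2 _ _; omega
  | succ fuel ih =>
    intro L j hL hLj hfuel hlo hhi
    rw [digLenB]
    by_cases h : (10:Int)^L ≤ n
    · simp only [h, if_true]
      have hne : L ≠ j := by rintro rfl; omega
      have : ((L:Int) + 1) = ((L+1 : Nat) : Int) := by push_cast; ring
      rw [this, show (10:Int)^L * 10 = 10^(L+1) from (pow_succ 10 L).symm]
      exact ih (L+1) j (by omega) (by omega) (by omega) hlo hhi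
    · simp only [h, if_false]
      have : (10:Int)^(j-1) < 10^L := lt_of_le_of_lt hlo (by omega)
      have hlt : j - 1 < L := by
        by_contra hc
        have hle : (10:Int)^L ≤ 10^(j-1) := pow_le_pow_right₀ (by norm_num) (by omega)
        omega
      have : L = j := by omega
      subst this; rfl

theorem floordiv_nine_mul (x : Int) : PySem.Int.floordiv (9 * x) 9 = x := by
  rw [PySem.Int.floordiv_eq_ediv_of_pos (by norm_num)]
  exact Int.mul_ediv_cancel_left x (by norm_num)

-- full / partial / empty digit filters
theorem filter_digits_full (n m : Int) (hm : 1 ≤ m) (h : 9 * m ≤ n) :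
    (PySem.List.pyRange 1 10 1).filter (fun x => decide (x * m ≤ n)) = PySem.List.pyRange 1 10 1 := by
  rw [List.filter_eq_self]
  intro d hd
  rw [PySem.List.mem_pyRange_one] at hd
  have : d * m ≤ 9 * m := by nlinarith
  simp; omega

theorem filter_digits_empty (n m : Int) (hm : 1 ≤ m) (h : n < m) :
    (PySem.List.pyRange 1 10 1).filter (fun x => decide (x * m ≤ n)) = [] := by
  rw [List.filter_eq_nil_iff]
  intro d hd
  rw [PySem.List.mem_pyRange_one] at hd
  have : m ≤ d * m := by nlinarith
  simp; omega

theorem filter_digits_partial (n m t : Int) (ht0 : 0 ≤ t) (ht9 : t ≤ 9)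
    (hiff : ∀ d : Int, 1 ≤ d → d ≤ 9 → (d * m ≤ n ↔ d ≤ t)) :
    (PySem.List.pyRange 1 10 1).filter (fun x => decide (x * m ≤ n)) = PySem.List.pyRange 1 (t+1) 1 := by
  have hsplit : PySem.List.pyRange 1 10 1 = PySem.List.pyRange 1 (t+1) 1 ++ PySem.List.pyRange (t+1) 10 1 :=
    PySem.List.pyRange_one_append 1 (t+1) 10 (by omega) (by omega)
  rw [hsplit, List.filter_append]
  have h1 : (PySem.List.pyRange 1 (t+1) 1).filter (fun x => decide (x * m ≤ n)) = PySem.List.pyRange 1 (t+1) 1 := by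
    rw [List.filter_eq_self]
    intro d hd
    rw [PySem.List.mem_pyRange_one] at hd
    have := (hiff d (by omega) (by omega)).mpr (by omega)
    simpa
  have h2 : (PySem.List.pyRange (t+1) 10 1).filter (fun x => decide (x * m ≤ n)) = [] := by
    rw [List.filter_eq_nil_iff]
    intro d hd
    rw [PySem.List.mem_pyRange_one] at hd
    have := (hiff d (by omega) (by omega))
    simp; omega
  rw [h1, h2, List.append_nil]

-- B's index formula at a Nat index
theorem formula_at_nat (m : Nat) :
    PySem.Int.floordiv ((PySem.Int.mod (m : Int) 9 + 1) * (10 ^ (PySem.Int.floordiv (m : Int) 9 + 1).toNat - 1)) 9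
      = (((m % 9 : Nat) : Int) + 1) * repunit (m / 9 + 1) := by
  have h1 : PySem.Int.mod (m:Int) 9 = ((m % 9 : Nat) : Int) := by exact_mod_cast PySem.Int.mod_natCast m 9
  have h2 : PySem.Int.floordiv (m:Int) 9 = ((m / 9 : Nat) : Int) := by exact_mod_cast PySem.Int.floordiv_natCast m 9
  rw [h1, h2]
  have h3 : (((m / 9 : Nat) : Int) + 1).toNat = m / 9 + 1 := by omega
  rw [h3, ← nine_mul_repunit (m / 9 + 1),
      show (((m % 9 : Nat) : Int) + 1) * (9 * repunit (m / 9 + 1))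
        = 9 * ((((m % 9 : Nat) : Int) + 1) * repunit (m / 9 + 1)) from by ring]
  exact floordiv_nine_mul _

-- one chunk of at most 9 consecutive indices, all with the same repunit
theorem range_chunk (t c : Nat) (ht : t ≤ 9) :
    (List.range t).map (fun m => (((m % 9 : Nat) : Int) + 1) * repunit (m / 9 + 1 + c))
      = (PySem.List.pyRange 1 ((t : Int) + 1) 1).map (fun d => d * repunit (1 + c)) := by
  rw [PySem.List.pyRange_one]
  have h : (((t : Int) + 1 - 1).toNat) = t := by omega
  rw [h, List.map_map]
  apply List.map_congr_left
  intro m hm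
  rw [List.mem_range] at hm
  have hmod : m % 9 = m := Nat.mod_eq_of_lt (by omega)
  have hdiv : m / 9 = 0 := Nat.div_eq_of_lt (by omega)
  simp only [hmod, hdiv, Function.comp]
  push_cast
  ring

-- B's mapped range, chunked: full chunks of 9 plus a partial chunk of t
theorem mapf_chunks : ∀ (a t c : Nat), t ≤ 9 →
    (List.range (9 * a + t)).map (fun m => (((m % 9 : Nat) : Int) + 1) * repunit (m / 9 + 1 + c))
      = (List.range a).flatMap (fun b => (PySem.List.pyRange 1 10 1).map (fun d => d * repunit (b + 1 + c)))
        ++ (PySem.List.pyRange 1 ((t : Int) + 1) 1).map (fun d => d * repunit (a + 1 + c)) := by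
  intro a
  induction a with
  | zero =>
    intro t c ht
    simp only [Nat.mul_zero, Nat.zero_add, List.range_zero, List.flatMap_nil, List.nil_append]
    exact (range_chunk t c ht).trans (by norm_num)
  | succ a ih =>
    intro t c ht
    -- left side: peel one full chunk of 9 off the front
    rw [show 9 * (a + 1) + t = 9 + (9 * a + t) from by ring, List.range_add, List.map_append,
        List.map_map]
    have hfront : (List.range 9).map (fun m => (((m % 9 : Nat) : Int) + 1) * repunit (m / 9 + 1 + c))
        = (PySem.List.pyRange 1 10 1).map (fun d => d * repunit (1 + c)) := by
      have := range_chunk 9 c (by omega)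
      rwa [show ((9 : Nat) : Int) + 1 = 10 from by norm_num] at this
    rw [hfront]
    have hshift : (List.range (9 * a + t)).map
          ((fun m => (((m % 9 : Nat) : Int) + 1) * repunit (m / 9 + 1 + c)) ∘ (fun x => 9 + x))
        = (List.range (9 * a + t)).map (fun m => (((m % 9 : Nat) : Int) + 1) * repunit (m / 9 + 1 + (c + 1))) := by
      apply List.map_congr_left
      intro m _
      have hmod : (9 + m) % 9 = m % 9 := Nat.add_mod_left 9 m
      have hdiv : (9 + m) / 9 = m / 9 + 1 := by
        rw [Nat.add_comm 9 m]; exact Nat.add_div_right m (by omega)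
      simp only [Function.comp, hmod, hdiv]
      have : m / 9 + 1 + 1 + c = m / 9 + 1 + (c + 1) := by omega
      rw [this]
    rw [hshift, ih t (c + 1) ht]
    -- right side: peel the chunk for b = 0 off the flatMap
    rw [show a + 1 = 1 + a from by omega, List.range_add, List.flatMap_append]
    have h0 : (List.range 1).flatMap (fun b => (PySem.List.pyRange 1 10 1).map (fun d => d * repunit (b + 1 + c)))
        = (PySem.List.pyRange 1 10 1).map (fun d => d * repunit (1 + c)) := by
      simp only [List.range_one, List.flatMap_cons, List.flatMap_nil, List.append_nil]
    rw [h0, List.flatMap_map]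
    have h1 : (List.range a).flatMap (fun b => (PySem.List.pyRange 1 10 1).map (fun d => d * repunit (b + 1 + (c + 1))))
        = (List.range a).flatMap (fun x => (PySem.List.pyRange 1 10 1).map (fun d => d * repunit (1 + x + 1 + c))) := by
      apply List.flatMap_congr
      intro b _
      have : b + 1 + (c + 1) = 1 + b + 1 + c := by omega
      rw [this]
    rw [h1, show 1 + a + (c + 1) = 1 + a + 1 + c from by omega, List.append_assoc]

theorem repunit_nonneg : ∀ m : Nat, 0 ≤ repunit m := by
  intro m
  induction m with
  | zero => simp [repunit]
  | succ m ih => rw [repunit]; omega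

theorem repunit_pos (m : Nat) (h : 1 ≤ m) : 1 ≤ repunit m := by
  obtain ⟨k, rfl⟩ : ∃ k, m = k + 1 := ⟨m - 1, by omega⟩
  have := repunit_nonneg k
  rw [repunit]; omega

theorem pyRange_zero_nat' (K : Nat) :
    PySem.List.pyRange 0 (K:Int) 1 = (List.range K).map (fun k : Nat => (k:Int)) := by
  rw [PySem.List.pyRange_one]
  simp only [sub_zero, Int.toNat_natCast, zero_add]

-- the canonical list, decomposed at the digit count j of n
theorem canon_chunks (n : Int) (j : Nat) (hj1 : 1 ≤ j) (hj10 : j ≤ 10)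
    (hlo : (10:Int)^(j-1) ≤ n) (hhi : n < (10:Int)^j) (t : Int)
    (ht0 : 0 ≤ t) (ht9 : t ≤ 9)
    (hiff : ∀ d : Int, 1 ≤ d → d ≤ 9 → (d * repunit j ≤ n ↔ d ≤ t)) :
    rdCanon n
      = (List.range (j-1)).flatMap (fun b => (PySem.List.pyRange 1 10 1).map (fun x => x * repunit (b+1)))
        ++ (PySem.List.pyRange 1 (t+1) 1).map (fun x => x * repunit ((j-1)+1)) := by
  have hru : ruFrom 10 1 = (List.range 10).map (fun b => repunit (b+1)) := by decide
  unfold rdCanon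
  rw [hru, List.flatMap_map]
  rw [show (10:Nat) = (j-1) + (1 + (10 - j)) from by omega, List.range_add, List.flatMap_append]
  congr 1
  · -- the j-1 full chunks
    apply List.flatMap_congr
    intro b hb
    rw [List.mem_range] at hb
    rw [filter_digits_full n (repunit (b+1)) (repunit_pos _ (by omega)) (by
      have hp : (10:Int)^(b+1) ≤ 10^(j-1) := pow_le_pow_right₀ (by norm_num) (by omega)
      have h9 := nine_mul_repunit (b+1)
      omega)]
  · -- the partial chunk at length j, then nothing
    rw [List.flatMap_map, List.range_add, List.flatMap_append]
    have hpart : (List.range 1).flatMap (fun b =>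
        ((PySem.List.pyRange 1 10 1).filter (fun x => decide (x * repunit (j-1+b+1) ≤ n))).map
          (fun x => x * repunit (j-1+b+1)))
        = (PySem.List.pyRange 1 (t+1) 1).map (fun x => x * repunit ((j-1)+1)) := by
      simp only [List.range_one, List.flatMap_cons, List.flatMap_nil, List.append_nil, Nat.add_zero]
      rw [filter_digits_partial n (repunit (j-1+1)) t ht0 ht9 (by
        intro d hd1 hd9
        rw [show j - 1 + 1 = j from by omega]
        exact hiff d hd1 hd9)]
    have hempty : ((List.range (10-j)).map (fun s => 1 + s)).flatMap (fun b =>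
        ((PySem.List.pyRange 1 10 1).filter (fun x => decide (x * repunit (j-1+b+1) ≤ n))).map
          (fun x => x * repunit (j-1+b+1)))
        = [] := by
      rw [List.flatMap_eq_nil_iff]
      intro l hl
      rw [List.mem_map] at hl
      obtain ⟨b, hb, rfl⟩ := hl
      rw [filter_digits_empty n _ (repunit_pos _ (by omega)) (by
        have h9 := nine_mul_repunit (j - 1 + (1 + b) + 1)
        have hp : (10:Int)^(j+1) ≤ 10^(j - 1 + (1 + b) + 1) :=
          pow_le_pow_right₀ (by norm_num) (by omega)
        have hps : (10:Int)^(j+1) = 10^j * 10 := pow_succ 10 j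
        have hpos : (0:Int) < 10^j := pow_pos (by norm_num) j
        omega)]
      simp
    rw [hpart, hempty, List.append_nil]

-- B's port evaluates to the canonical list for 1 ≤ n in the domain
theorem alt_eq_canon (n : Int) (h1 : 1 ≤ n) (h2 : n ≤ 2147483648) :
    repdigits_at_most_alt n = rdCanon n := by
  set j := Nat.log 10 n.toNat + 1 with hj
  have hne : n.toNat ≠ 0 := by omega
  have hj1e : j - 1 = Nat.log 10 n.toNat := by omega
  have hlo : (10:Int)^(j-1) ≤ n := by
    rw [hj1e]
    calc ((10:Int))^(Nat.log 10 n.toNat) = ((10 ^ Nat.log 10 n.toNat : Nat) : Int) := by push_cast; rfl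
      _ ≤ (n.toNat : Int) := by exact_mod_cast Nat.pow_log_le_self 10 hne
      _ = n := Int.toNat_of_nonneg (by omega)
  have hhi : n < (10:Int)^j := by
    calc n = (n.toNat : Int) := (Int.toNat_of_nonneg (by omega)).symm
      _ < ((10 ^ (Nat.log 10 n.toNat + 1) : Nat) : Int) := by exact_mod_cast Nat.lt_pow_succ_log_self (by norm_num) n.toNat
      _ = (10:Int)^j := by rw [hj]; push_cast; rfl
  have hj1 : 1 ≤ j := by omega
  have hj10 : j ≤ 10 := by
    by_contra hc
    have hp : (10:Int)^10 ≤ 10^(j-1) := pow_le_pow_right₀ (by norm_num) (by omega)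
    have he : (10:Int)^10 = 10000000000 := by norm_num
    omega
  have hdig : digLenB 12 n (1, 10) = ((j:Int), (10:Int)^j) := by
    have := digLenB_eval n 12 1 j (by omega) (by omega) (by omega) hlo hhi
    norm_num at this
    exact this
  have hR : PySem.Int.floordiv ((10:Int)^j - 1) 9 = repunit j := by
    rw [← nine_mul_repunit j]
    exact floordiv_nine_mul _
  have hRpos : (1:Int) ≤ repunit j := repunit_pos j hj1
  have hq0 : 0 ≤ PySem.Int.floordiv n (repunit j) := by
    rw [PySem.Int.le_floordiv_iff_mul_le (by omega)]; omega
  set t := min (9:Int) (PySem.Int.floordiv n (repunit j)) with ht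
  have ht0 : 0 ≤ t := le_min (by norm_num) hq0
  have ht9 : t ≤ 9 := min_le_left _ _
  have hiff : ∀ d : Int, 1 ≤ d → d ≤ 9 → (d * repunit j ≤ n ↔ d ≤ t) := by
    intro d hd1 hd9
    constructor
    · intro hdm
      refine le_min hd9 ?_
      rw [PySem.Int.le_floordiv_iff_mul_le (by omega)]
      exact hdm
    · intro hdt
      have hdq : d ≤ PySem.Int.floordiv n (repunit j) := le_trans hdt (min_le_right _ _)
      rw [PySem.Int.le_floordiv_iff_mul_le (by omega)] at hdq
      exact hdq
  unfold repdigits_at_most_alt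
  rw [if_neg (by omega)]
  simp only [hdig, hR]
  rw [show 9 * ((j:Int) - 1) + t = ((9 * (j-1) + t.toNat : Nat) : Int) from by push_cast; omega]
  rw [pyRange_zero_nat', List.map_map]
  have hform : (List.range (9 * (j-1) + t.toNat)).map
      ((fun i => PySem.Int.floordiv ((PySem.Int.mod i 9 + 1) * (10 ^ (PySem.Int.floordiv i 9 + 1).toNat - 1)) 9) ∘ (fun k : Nat => (k:Int)))
      = (List.range (9 * (j-1) + t.toNat)).map (fun m => (((m % 9 : Nat) : Int) + 1) * repunit (m / 9 + 1 + 0)) := by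
    apply List.map_congr_left
    intro m _
    simpa using formula_at_nat m
  rw [hform, mapf_chunks (j-1) t.toNat 0 (by omega)]
  rw [canon_chunks n j hj1 hj10 hlo hhi t ht0 ht9 hiff]
  simp only [Nat.add_zero]
  rw [show ((t.toNat : Int)) = t from by omega]

-- ===== VERDICT (by name: the statement is the Claim_ definition above) =====
theorem repdigits_at_most_spec : Claim_equal_repdigits_at_most := by
  intro n hdom
  unfold Spec_repdigits_at_most
  have hn2 : n ≤ 2147483648 := by
    unfold Dom_repdigits_at_most pvDomInt at hdom
    simpa using (of_decide_eq_true hdom).2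
  by_cases h1 : n < 1
  · unfold repdigits_at_most repdigits_at_most_alt
    rw [if_pos h1]
    rw [show PySem.List.pyRange 1 10 1 = 1 :: PySem.List.pyRange 2 10 1 from by decide]
    rw [repA_loop, if_pos (by omega)]
    decide
  · rw [A_eq_canon n hn2, alt_eq_canon n (by omega) hn2]
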